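-- pv_equiv track=rewrite | github.com/ptjahjadi/Phased-Out | bonus_play_strategy.py | check_group1
-- ===== SOURCE A (Python) =====
-- def check_group1(group):
--     """ This function checks the validity of group 1 in the combination
--     of cards. This function acts similar to Q1 with less considerations and
--     only focusing in group 1 validity.
--     """
--     if "ZZ" in group:
--         return False
--     else:
--         numberlist = []
--         num = 1
--         naturals = 0
--         for card in group:
--             if card[0] == "0":
--                 numberlist.append("10")
--             elif card[0] == "J":
--                 numberlist.append("11")
--             elif card[0] == "Q":
--                 numberlist.append("12")
--             elif card[0] == "K":
--                 numberlist.append("13")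
--             else:
--                 numberlist.append(card[0])
--         for natural_check in numberlist:
--             if natural_check != "A":
--                 naturals += 1
--         for natural_num in numberlist:
--             if natural_num != "A":
--                 first_num = natural_num
--                 break
--         for check_num in range(1, len(numberlist)):
--             try:
--                 if (first_num == numberlist[check_num] or
--                         numberlist[check_num] == "A"):
--                         num += 1
--             except UnboundLocalError:
--                 break
--         if num == 3 and naturals >= 2 and len(numberlist) == 3:
--             return True
--         else:
--             return False
-- ===== SOURCE B (Python) =====
-- def check_group1(group):
--     """Simpler re-implementation: a group is valid iff it has 3 cards and the
--     non-'A' ranks (at least two of them) are all one single rank."""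
--     if "ZZ" in group:
--         return False
--     ranks = []
--     for card in group:
--         c = card[0]
--         ranks.append({"0": "10", "J": "11", "Q": "12", "K": "13"}.get(c, c))
--     non_a = [r for r in ranks if r != "A"]
--     return len(ranks) == 3 and len(non_a) >= 2 and len(set(non_a)) == 1
-- ===== Notes on version B (the rewrite author's own statement) =====
-- stated objective: simpler
-- what changed: Replaces A's naturals-counter, find-first-non-A loop, indexed matching loop with try/except and the num==3 tally by a single uniqueness test: 3 cards, at least two non-'A' ranks, and all non-'A' ranks equal.
import Mathlib
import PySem

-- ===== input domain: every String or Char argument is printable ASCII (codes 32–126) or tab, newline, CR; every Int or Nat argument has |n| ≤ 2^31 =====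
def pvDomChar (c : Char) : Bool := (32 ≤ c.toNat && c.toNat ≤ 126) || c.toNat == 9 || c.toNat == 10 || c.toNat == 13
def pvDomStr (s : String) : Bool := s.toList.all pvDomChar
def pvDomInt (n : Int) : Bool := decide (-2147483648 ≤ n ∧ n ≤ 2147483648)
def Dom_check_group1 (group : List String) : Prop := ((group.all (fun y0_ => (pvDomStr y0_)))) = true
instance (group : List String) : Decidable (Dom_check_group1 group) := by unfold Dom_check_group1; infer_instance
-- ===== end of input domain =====

-- B is simpler: one uniqueness test on the non-'A' ranks replaces A's counter loop,
-- find-first loop and indexed matching loop with try/except; same return value on Pre_.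

-- ===== PORT A =====
-- card[0] with A's if/elif rank translation; "" raises IndexError in Python, excluded by Pre_
def rankOfA (card : String) : String :=
  match card.toList with
  | [] => ""            -- unreachable under Pre_ (IndexError in Python)
  | c :: _ =>
    if c = '0' then "10"
    else if c = 'J' then "11"
    else if c = 'Q' then "12"
    else if c = 'K' then "13"
    else String.ofList [c]

def check_group1 (group : List String) : Bool :=
  if group.contains "ZZ" then false
  else
    let numberlist := group.foldl (fun acc card => acc ++ [rankOfA card]) []
    let naturals := numberlist.foldl (fun n r => if r ≠ "A" then n + 1 else n) (0 : Int)
    -- find-first loop with break; none = UnboundLocalError caught by the except, leaving num = 1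
    let first_num? := numberlist.find? (fun r => r ≠ "A")
    let num : Int :=
      match first_num? with
      | none => 1
      | some first_num =>
        (PySem.List.pyRange 1 numberlist.length 1).foldl
          (fun n i =>
            if PySem.List.pyGetD numberlist i "" = first_num ∨
               PySem.List.pyGetD numberlist i "" = "A" then n + 1 else n) 1
    if num = 3 ∧ naturals ≥ 2 ∧ numberlist.length = 3 then true else false

-- ===== PORT B =====
-- card[0] with B's dict lookup; "" raises IndexError in Python, excluded by Pre_
def rankOfB (card : String) : String :=
  match card.toList with
  | [] => ""            -- unreachable under Pre_ (IndexError in Python)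
  | c :: _ =>
    PySem.Dict.getD (PySem.Dict.ofList [("0", "10"), ("J", "11"), ("Q", "12"), ("K", "13")])
      (String.ofList [c]) (String.ofList [c])

def check_group1_alt (group : List String) : Bool :=
  if group.contains "ZZ" then false
  else
    let ranks := group.map rankOfB
    let non_a := ranks.filter (fun r => r ≠ "A")
    decide (ranks.length = 3) && decide (non_a.length ≥ 2) &&
      decide ((PySem.Set.ofList non_a).length = 1)

-- ===== PRECONDITION & SPEC =====
-- Pre_ excludes groups containing an empty-string card without any "ZZ" card: there
-- Python A (and B) raises IndexError on card[0].
def Pre_check_group1 (group : List String) : Prop :=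
  "ZZ" ∈ group ∨ ¬ ("" ∈ group)
instance (group : List String) : Decidable (Pre_check_group1 group) := by
  unfold Pre_check_group1; infer_instance
def pvWitness_check_group1 : List String := ["5H", "5D", "AS"]
def Spec_check_group1 (group : List String) (out : Bool) : Prop := out = check_group1_alt group
instance (group : List String) (out : Bool) : Decidable (Spec_check_group1 group out) := by
  unfold Spec_check_group1; infer_instance

-- ===== CLAIM (what is proved, stated in full; the proofs are below) =====
def Claim_equal_check_group1 : Prop := ∀ (group : List String), Dom_check_group1 group → Pre_check_group1 group → Spec_check_group1 group (check_group1 group)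

-- ===== LEMMAS AND PROOFS =====

theorem rankB_eq_rankA (s : String) : rankOfB s = rankOfA s := by
  unfold rankOfA rankOfB
  cases s.toList with
  | nil => rfl
  | cons c _ =>
    have e : ∀ d : Char, ¬ c = d → ((String.ofList [d] == String.ofList [c]) = false) := by
      intro d hd
      simp [String.ext_iff]
      exact fun h => hd h.symm
    by_cases h0 : c = '0'
    · subst h0; rfl
    by_cases hJ : c = 'J'
    · subst hJ; rfl
    by_cases hQ : c = 'Q'
    · subst hQ; rfl
    by_cases hK : c = 'K'
    · subst hK; rfl
    simp [PySem.Dict.ofList, PySem.Dict.update, PySem.Dict.empty, PySem.Dict.insert,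
      PySem.Dict.getD, PySem.Dict.get?, PySem.Dict.contains, List.find?,
      show (("0":String) = String.ofList ['0']) from rfl,
      show (("J":String) = String.ofList ['J']) from rfl,
      show (("Q":String) = String.ofList ['Q']) from rfl,
      show (("K":String) = String.ofList ['K']) from rfl,
      e _ h0, e _ hJ, e _ hQ, e _ hK, h0, hJ, hQ, hK]

theorem foldl_snoc (f : String → String) :
    ∀ (g : List String) (acc : List String),
      g.foldl (fun a card => a ++ [f card]) acc = acc ++ g.map f := by
  intro g
  induction g with
  | nil => simp
  | cons x xs ih => intro acc; simp [List.foldl, ih]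

theorem core (x y z : String) (h : ([x, y, z].contains "ZZ") = false) :
    check_group1 [x, y, z] = check_group1_alt [x, y, z] := by
  unfold check_group1 check_group1_alt
  rw [show ∀ g : List String, g.map rankOfB = g.map rankOfA from
    fun g => List.map_congr_left (fun s _ => rankB_eq_rankA s)]
  simp only [h, Bool.false_eq_true, if_false, foldl_snoc, List.nil_append, List.map_cons,
    List.map_nil]
  simp only [List.length_cons, List.length_nil]
  rw [show ((0 + 1 + 1 + 1 : Nat) : Int) = 3 from rfl,
    show PySem.List.pyRange 1 3 1 = [1, 2] from rfl]
  by_cases ha : rankOfA x = "A" <;> by_cases hb : rankOfA y = "A" <;>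
    by_cases hc : rankOfA z = "A" <;> by_cases h1 : rankOfA y = rankOfA x <;>
    by_cases h2 : rankOfA z = rankOfA x <;> by_cases h3 : rankOfA z = rankOfA y <;>
    simp_all [List.find?, List.foldl, PySem.List.pyGetD, PySem.List.pyGet?, PySem.List.pyIdx?,
      PySem.Set.ofList_eq_foldl, List.filter]

theorem not_len3 (g : List String) (hzz : g.contains "ZZ" = false) (hl : g.length ≠ 3) :
    check_group1 g = false ∧ check_group1_alt g = false := by
  unfold check_group1 check_group1_alt
  simp only [hzz, Bool.false_eq_true, if_false, foldl_snoc, List.nil_append]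
  constructor
  · rw [if_neg]; rintro ⟨-, -, hlen⟩; simp at hlen; exact hl hlen
  · simp [hl]

theorem check_group1_spec : Claim_equal_check_group1 := by
  intro group _ _
  unfold Spec_check_group1
  by_cases hzz : group.contains "ZZ" = true
  · unfold check_group1 check_group1_alt; rw [if_pos hzz]; rw [if_pos hzz]
  · rw [Bool.not_eq_true] at hzz
    match group with
    | [] => obtain ⟨h1, h2⟩ := not_len3 [] hzz (by simp); rw [h1, h2]
    | [x] => obtain ⟨h1, h2⟩ := not_len3 [x] hzz (by simp); rw [h1, h2]
    | [x, y] => obtain ⟨h1, h2⟩ := not_len3 [x, y] hzz (by simp); rw [h1, h2]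
    | [x, y, z] => exact core x y z hzz
    | x :: y :: z :: w :: rest =>
      obtain ⟨h1, h2⟩ := not_len3 (x :: y :: z :: w :: rest) hzz (by simp)
      rw [h1, h2]
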